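-- pv_equiv track=rewrite | github.com/thelenkaaa/Mathematical-Methods-of-Optimization | primal_simplex.py | basis
-- ===== SOURCE A (Python) =====
-- M = 100000
--
-- def is_unit_column(row):
--     return sum(row) == 1 and all(elem in [0, 1] for elem in row)
--
-- def basis(A, c):
--     basis_list = [-1]*len(A)
--     num_cols = len(A[0])
--
--     for j in range(num_cols):
--
--         column = []
--         for i in range(len(A)):
--             column.append(A[i][j])
--         if is_unit_column(column):
--             pos = column.index(1)
--
--             basis_list[pos] = j
--
--     if -1 in basis_list:
--         c.append(M)
--         for i in range(len(A)):
--             A[i].append(0)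
--         A[basis_list.index(-1)][-1] = 1
--         basis_list[basis_list.index(-1)] = len(c) - 1
--
--     return basis_list
-- ===== SOURCE B (Python) =====
-- M = 100000
--
-- def basis(A, c):
--     # Row-centric search: basis_list[i] in the original is the LAST column j whose
--     # column is a unit column with its single 1 in row i, i.e. the last j with
--     # A[i][j] == 1 and A[k][j] == 0 for every k != i (such a column automatically
--     # has sum 1 and entries in {0,1}).  So scan each row's columns right-to-left
--     # with an early break instead of extracting and testing every column.
--     n, num_cols = len(A), len(A[0])
--     basis_list = []
--     for i in range(n):
--         b = -1
--         for j in reversed(range(num_cols)):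
--             if A[i][j] == 1 and all(A[k][j] == 0 for k in range(n) if k != i):
--                 b = j
--                 break
--         basis_list.append(b)
--     if -1 in basis_list:
--         c.append(M)
--         for row in A:
--             row.append(0)
--         k = basis_list.index(-1)
--         A[k][-1] = 1
--         basis_list[k] = len(c) - 1
--     return basis_list
-- ===== Notes on version B (the rewrite author's own statement) =====
-- stated objective: alternative
-- what changed: Replaces A's column-by-column extraction and unit-column test (sum==1, entries in {0,1}, then index of the 1) by a row-centric search: for each row i scan columns right-to-left and take the first j with A[i][j]==1 and zeros in every other row of that column (such a column is automatically unit), breaking early; the artificial-variable block is unchanged.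
import Mathlib
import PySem

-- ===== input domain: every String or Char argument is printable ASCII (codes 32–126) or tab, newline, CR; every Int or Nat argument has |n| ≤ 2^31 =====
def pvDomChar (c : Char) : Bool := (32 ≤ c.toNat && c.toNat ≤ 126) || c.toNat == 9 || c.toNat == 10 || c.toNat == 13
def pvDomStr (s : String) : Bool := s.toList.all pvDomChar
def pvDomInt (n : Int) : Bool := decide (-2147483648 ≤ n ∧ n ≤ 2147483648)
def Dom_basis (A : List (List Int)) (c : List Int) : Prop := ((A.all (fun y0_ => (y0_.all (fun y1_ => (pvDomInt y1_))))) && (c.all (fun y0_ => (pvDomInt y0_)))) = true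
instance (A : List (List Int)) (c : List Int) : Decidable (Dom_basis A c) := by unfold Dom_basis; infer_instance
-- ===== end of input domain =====

-- B replaces A's column-extraction + unit-column test by a row-centric right-to-left search
-- (first j with A[i][j]=1 and zeros elsewhere in column j); return-value equivalence only —
-- both Pythons also mutate A and c in the same way in the artificial-variable branch.


-- ===== PORT A =====
def isUnitColumn (col : List Int) : Bool :=
  (col.sum == 1) && col.all (fun e => e == 0 || e == 1)

-- body of A's 'for j in range(num_cols)' loop
def stepA (Amat : List (List Int)) (bl : List Int) (j : Nat) : List Int :=
  let column := Amat.map (fun row => row.getD j 0)   -- getD is exact under Pre_basis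
  if isUnitColumn column then
    match PySem.List.index? column 1 with
    | some pos => bl.set pos (j : Int)
    | none => bl      -- unreachable: sum == 1 with entries in {0,1} puts a 1 in the column
  else bl

def basis (A : List (List Int)) (c : List Int) : List Int :=
  let numCols := (A.headD []).length      -- len(A[0]); Pre_basis excludes A = []
  let bl := (List.range numCols).foldl (stepA A) (List.replicate A.length (-1 : Int))
  if (-1 : Int) ∈ bl then
    match PySem.List.index? bl (-1) with
    | some k => bl.set k ((c.length : Int))   -- len(c) - 1 after c.append(M) = original len(c)
    | none => bl
  else bl

-- ===== PORT B =====
-- all(A[k][j] == 0 for k in range(len(A)) if k != i)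
def colZeros (Amat : List (List Int)) (i j : Nat) : Bool :=
  (List.range Amat.length).all (fun k => k == i || (Amat.getD k []).getD j 0 == 0)

-- the inner 'for j in reversed(range(num_cols)) … break' search of B
def findB (Amat : List (List Int)) (i : Nat) : List Nat → Int
  | [] => -1
  | j :: js =>
      if ((Amat.getD i []).getD j 0 == 1) && colZeros Amat i j then (j : Int)
      else findB Amat i js

def basis_alt (A : List (List Int)) (c : List Int) : List Int :=
  let numCols := (A.headD []).length
  let bl := (List.range A.length).map (fun i => findB A i (List.range numCols).reverse)
  if (-1 : Int) ∈ bl then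
    match PySem.List.index? bl (-1) with
    | some k => bl.set k ((c.length : Int))
    | none => bl
  else bl

-- ===== PRECONDITION & SPEC =====
-- Pre_basis excludes exactly the inputs on which Python A raises: A = [] (len(A[0]) → IndexError)
-- and matrices with a row shorter than the first row (A[i][j] → IndexError).
def Pre_basis (A : List (List Int)) (c : List Int) : Prop :=
  A ≠ [] ∧ ∀ row ∈ A, (A.headD []).length ≤ row.length
instance (A : List (List Int)) (c : List Int) : Decidable (Pre_basis A c) := by
  unfold Pre_basis; infer_instance

def pvWitness_basis : List (List Int) × List Int := ([[1, 0, 2], [0, 1, 3]], [4, 5, 6])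

def Spec_basis (A : List (List Int)) (c : List Int) (out : List Int) : Prop := out = basis_alt A c
instance (A : List (List Int)) (c : List Int) (out : List Int) : Decidable (Spec_basis A c out) := by
  unfold Spec_basis; infer_instance

-- ===== CLAIM (what is proved, stated in full; the proofs are below) =====
def Claim_equal_basis : Prop :=
  ∀ (A : List (List Int)) (c : List Int), Dom_basis A c → Pre_basis A c → Spec_basis A c (basis A c)

-- ===== LEMMAS AND PROOFS =====

-- A's test on column j, seen from row i: column j is unit and its (unique) 1 is in row i
def Pb (Amat : List (List Int)) (i j : Nat) : Bool :=
  isUnitColumn (Amat.map (fun row => row.getD j 0)) &&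
    (PySem.List.index? (Amat.map (fun row => row.getD j 0)) 1 == some i)

theorem sum_nonneg01 (xs : List Int) (h : ∀ e ∈ xs, e = 0 ∨ e = 1) : 0 ≤ xs.sum := by
  induction xs with
  | nil => simp
  | cons x xs ih =>
    have hx := h x (List.mem_cons_self ..)
    have := ih (fun e he => h e (List.mem_cons_of_mem _ he))
    simp only [List.sum_cons]; omega

theorem sum_zero_all (xs : List Int) (h : ∀ e ∈ xs, e = 0 ∨ e = 1) (hs : xs.sum = 0) :
    ∀ e ∈ xs, e = 0 := by
  induction xs with
  | nil => simp
  | cons x xs ih =>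
    have hx := h x (List.mem_cons_self ..)
    have h' : ∀ e ∈ xs, e = 0 ∨ e = 1 := fun e he => h e (List.mem_cons_of_mem _ he)
    have hnn := sum_nonneg01 xs h'
    simp only [List.sum_cons] at hs
    intro e he
    rcases List.mem_cons.mp he with rfl | he'
    · omega
    · exact ih h' (by omega) e he'

-- characterisation of A's unit-column-with-1-at-i test
theorem unit_char (col : List Int) : ∀ i : Nat, i < col.length →
    ((col.sum = 1 ∧ ∀ e ∈ col, e = 0 ∨ e = 1) ∧ PySem.List.index? col 1 = some i ↔
      col.getD i 0 = 1 ∧ ∀ k, k < col.length → k ≠ i → col.getD k 0 = 0) := by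
  induction col with
  | nil => intro i hi; simp at hi
  | cons x xs ih =>
    intro i hi
    cases i with
    | zero =>
      constructor
      · rintro ⟨⟨hs, h01⟩, hidx⟩
        have hx : x = 1 := by
          by_contra hne
          rw [PySem.List.index?_cons_of_ne xs hne] at hidx
          obtain ⟨v, -, hv⟩ := Option.map_eq_some_iff.mp hidx
          omega
        subst hx
        have hxs : xs.sum = 0 := by simp only [List.sum_cons] at hs; omega
        have hz := sum_zero_all xs (fun e he => h01 e (List.mem_cons_of_mem _ he)) hxs
        refine ⟨rfl, ?_⟩
        intro k hk hk0
        cases k with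
        | zero => exact absurd rfl hk0
        | succ k' =>
          simp only [List.length_cons] at hk
          have hk' : k' < xs.length := by omega
          simp only [List.getD_cons_succ]
          rw [List.getD_eq_getElem _ _ hk']
          exact hz _ (List.getElem_mem hk')

      · rintro ⟨hx, hz⟩
        simp only [List.getD_cons_zero] at hx
        subst hx
        have hz' : ∀ e ∈ xs, e = 0 := by
          intro e he
          obtain ⟨k, hk, rfl⟩ := List.mem_iff_getElem.mp he
          have h := hz (k + 1) (by simp; omega) (by omega)
          rw [List.getD_cons_succ, List.getD_eq_getElem _ _ hk] at h
          exact h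
        refine ⟨⟨?_, ?_⟩, PySem.List.index?_cons_self ..⟩
        · simp [List.sum_eq_zero hz']
        · intro e he
          rcases List.mem_cons.mp he with rfl | he'
          · right; rfl
          · left; exact hz' e he'
    | succ i' =>
      simp only [List.length_cons] at hi
      have hi' : i' < xs.length := by omega
      constructor
      · rintro ⟨⟨hs, h01⟩, hidx⟩
        have hx : x ≠ 1 := by
          intro h; subst h
          rw [PySem.List.index?_cons_self] at hidx
          simp at hidx
        rw [PySem.List.index?_cons_of_ne xs hx] at hidx
        have hx0 : x = 0 := by rcases h01 x (List.mem_cons_self ..) with h | h <;> omega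
        subst hx0
        have hidx' : PySem.List.index? xs 1 = some i' := by
          obtain ⟨v, hv, hvi⟩ := Option.map_eq_some_iff.mp hidx
          rw [hv]; congr 1; omega
        have hxs : xs.sum = 1 := by simp only [List.sum_cons] at hs; omega
        obtain ⟨h1, h2⟩ := (ih i' hi').mp
          ⟨⟨hxs, fun e he => h01 e (List.mem_cons_of_mem _ he)⟩, hidx'⟩
        refine ⟨by simpa using h1, ?_⟩
        intro k hk hkne
        cases k with
        | zero => simp
        | succ k' =>
          simp only [List.length_cons] at hk
          simp only [List.getD_cons_succ]
          exact h2 k' (by omega) (by omega)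
      · rintro ⟨h1, h2⟩
        simp only [List.getD_cons_succ] at h1
        have hx0 : x = 0 := by simpa using h2 0 (by simp) (by omega)
        subst hx0
        obtain ⟨⟨hs, h01⟩, hidx⟩ := (ih i' hi').mpr
          ⟨h1, fun k hk hkne => by
            have := h2 (k + 1) (by simp; omega) (by omega)
            simpa using this⟩
        refine ⟨⟨by simp [hs], ?_⟩, ?_⟩
        · intro e he
          rcases List.mem_cons.mp he with rfl | he'
          · left; rfl
          · exact h01 e he'
        · rw [PySem.List.index?_cons_of_ne xs (by omega), hidx]
          rfl
    
-- A's test equals B's test, row by row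
theorem Pb_eq_Qb (Amat : List (List Int)) (i j : Nat) (hi : i < Amat.length) :
    Pb Amat i j = (((Amat.getD i []).getD j 0 == 1) && colZeros Amat i j) := by
  have hlen : (Amat.map (fun row => row.getD j 0)).length = Amat.length := by simp
  rw [Bool.eq_iff_iff]
  unfold Pb isUnitColumn colZeros
  simp only [Bool.and_eq_true, beq_iff_eq, List.all_eq_true, List.mem_range, Bool.or_eq_true]
  constructor
  · rintro ⟨⟨hs, h01⟩, hidx⟩
    obtain ⟨h1, h2⟩ := (unit_char _ i (by omega)).mp
      ⟨⟨hs, fun e he => by simpa using h01 e he⟩, hidx⟩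
    constructor
    · rw [List.getD_eq_getElem _ _ (by omega : i < (Amat.map (fun row => row.getD j 0)).length)] at h1
      simp only [List.getElem_map] at h1
      rw [List.getD_eq_getElem _ _ hi]
      exact h1
    · intro k hk
      by_cases hki : k = i
      · left; simpa using hki
      · right
        have hkk := h2 k (by omega) hki
        rw [List.getD_eq_getElem _ _ (by omega : k < (Amat.map (fun row => row.getD j 0)).length)] at hkk
        simp only [List.getElem_map] at hkk
        rw [List.getD_eq_getElem _ _ hk]
        exact hkk
  · rintro ⟨h1, h2⟩
    have h1' : (Amat.map (fun row => row.getD j 0)).getD i 0 = 1 := by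
      rw [List.getD_eq_getElem _ _ (by omega : i < (Amat.map (fun row => row.getD j 0)).length)]
      simp only [List.getElem_map]
      rwa [List.getD_eq_getElem _ _ hi] at h1
    have h2' : ∀ k, k < (Amat.map (fun row => row.getD j 0)).length → k ≠ i →
        (Amat.map (fun row => row.getD j 0)).getD k 0 = 0 := by
      intro k hk hki
      have hk' : k < Amat.length := by omega
      rcases h2 k hk' with h | h
      · exact absurd (by simpa using h) hki
      · rw [List.getD_eq_getElem _ _ hk]
        simp only [List.getElem_map]
        rwa [List.getD_eq_getElem _ _ hk'] at h
    obtain ⟨⟨hs, h01⟩, hidx⟩ := (unit_char _ i (by omega)).mpr ⟨h1', h2'⟩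
    exact ⟨⟨hs, fun e he => by simpa using h01 e he⟩, hidx⟩

theorem stepA_length (Amat : List (List Int)) (bl : List Int) (j : Nat) :
    (stepA Amat bl j).length = bl.length := by
  simp only [stepA]
  split
  · split <;> simp
  · rfl

theorem foldA_length (Amat : List (List Int)) (bl : List Int) : ∀ n : Nat,
    ((List.range n).foldl (stepA Amat) bl).length = bl.length := by
  intro n
  induction n with
  | zero => rfl
  | succ n ih => rw [List.range_succ, List.foldl_append]; simp [stepA_length, ih]

theorem stepA_getD (Amat : List (List Int)) (bl : List Int) (i j : Nat)
    (hi : i < bl.length) :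
    (stepA Amat bl j).getD i (-1) = if Pb Amat i j then (j : Int) else bl.getD i (-1) := by
  simp only [stepA, Pb]
  by_cases hu : isUnitColumn (List.map (fun row => row.getD j 0) Amat) = true
  · rw [if_pos hu]
    simp only [hu, Bool.true_and]
    cases h : PySem.List.index? (List.map (fun row => row.getD j 0) Amat) 1 with
    | none => simp
    | some p =>
      show (bl.set p (j : Int)).getD i (-1) =
        if (some p == some i) = true then (j : Int) else bl.getD i (-1)
      by_cases hpi : p = i
      · subst hpi
        rw [List.getD_eq_getElem _ _ (by simpa using hi :
              p < (bl.set p (j : Int)).length),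
            List.getElem_set_self (by simpa using hi)]
        simp
      · rw [List.getD_eq_getElem _ _ (by simpa using hi :
              i < (bl.set p (j : Int)).length),
            List.getElem_set_ne (by omega : p ≠ i),
            ← List.getD_eq_getElem bl (-1) hi]
        simp [hpi]
  · rw [if_neg hu, if_neg (by
      intro hc
      rw [Bool.and_eq_true] at hc
      exact hu hc.1)]

-- the heart: A's left-to-right overwrite fold equals B's right-to-left first-hit search
theorem fold_eq_find (Amat : List (List Int)) (i : Nat) (hi : i < Amat.length) : ∀ n : Nat,
    ((List.range n).foldl (stepA Amat) (List.replicate Amat.length (-1 : Int))).getD i (-1) =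
      findB Amat i (List.range n).reverse := by
  intro n
  induction n with
  | zero => simp [findB]
  | succ n ih =>
    rw [List.range_succ, List.foldl_append, List.reverse_append]
    simp only [List.foldl_cons, List.foldl_nil, List.reverse_singleton, List.singleton_append]
    rw [stepA_getD _ _ i n (by rw [foldA_length]; simpa using hi)]
    rw [Pb_eq_Qb _ _ _ hi]
    unfold findB
    split <;> simp_all

theorem bl_eq (Amat : List (List Int)) :
    (List.range (Amat.headD []).length).foldl (stepA Amat) (List.replicate Amat.length (-1 : Int)) =
      (List.range Amat.length).map
        (fun i => findB Amat i (List.range (Amat.headD []).length).reverse) := by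
  apply List.ext_getElem
  · simp [foldA_length]
  · intro i h1 h2
    have hi : i < Amat.length := by simpa using h2
    have := fold_eq_find Amat i hi (Amat.headD []).length
    rw [List.getD_eq_getElem _ _ h1] at this
    simpa using this

-- ===== VERDICT (by name: the statement is the Claim_ definition above) =====
theorem basis_spec : Claim_equal_basis := by
  intro A c _ _
  unfold Spec_basis
  simp only [basis, basis_alt]
  rw [bl_eq A]
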